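-- pv_equiv track=rewrite | github.com/Peeranat-Ks/8-puzzle-ai | Submission/8Puzzle.py | h2_manhattan_distance
-- ===== SOURCE A (Python) =====
-- def h2_manhattan_distance(state):
--     """
--     Heuristic 2: Sum of Manhattan distances.
--     """
--     distance = 0
--     # Target positions cache for 1-8
--     # 1:(0,0), 2:(0,1), 3:(0,2)
--     # 4:(1,0), 5:(1,1), 6:(1,2)
--     # 7:(2,0), 8:(2,1)
--     # This matches the GOAL_STATE
--     goal_positions = {
--         1: (0,0), 2: (0,1), 3: (0,2),
--         4: (1,0), 5: (1,1), 6: (1,2),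
--         7: (2,0), 8: (2,1)
--     }
--
--     for r in range(3):
--         for c in range(3):
--             val = state[r][c]
--             if val != 0:
--                 if val in goal_positions:
--                     target_r, target_c = goal_positions[val]
--                     distance += abs(r - target_r) + abs(c - target_c)
--     return distance
-- ===== SOURCE B (Python) =====
-- def h2_manhattan_distance(state):
--     """
--     Heuristic 2: Sum of Manhattan distances, value-major.
--     For each tile value v in 1..8 (goal cell divmod(v-1,3)), scan the grid
--     for every occurrence of v and add its distance to that goal cell.
--     """
--     total = 0
--     for v in range(1, 9):
--         grow, gcol = divmod(v - 1, 3)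
--         total += sum(abs(r - grow) + abs(c - gcol)
--                      for r in range(3) for c in range(3) if state[r][c] == v)
--     return total
-- ===== Notes on version B (the rewrite author's own statement) =====
-- stated objective: alternative
-- what changed: Replaces A's cell-major pass with a dict lookup per cell by a value-major traversal: for each tile value 1..8 (goal cell from divmod(v-1,3)) it scans the grid for that value's occurrences and sums their distances; the goal_positions dict disappears and the summation order is transposed.
import Mathlib
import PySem

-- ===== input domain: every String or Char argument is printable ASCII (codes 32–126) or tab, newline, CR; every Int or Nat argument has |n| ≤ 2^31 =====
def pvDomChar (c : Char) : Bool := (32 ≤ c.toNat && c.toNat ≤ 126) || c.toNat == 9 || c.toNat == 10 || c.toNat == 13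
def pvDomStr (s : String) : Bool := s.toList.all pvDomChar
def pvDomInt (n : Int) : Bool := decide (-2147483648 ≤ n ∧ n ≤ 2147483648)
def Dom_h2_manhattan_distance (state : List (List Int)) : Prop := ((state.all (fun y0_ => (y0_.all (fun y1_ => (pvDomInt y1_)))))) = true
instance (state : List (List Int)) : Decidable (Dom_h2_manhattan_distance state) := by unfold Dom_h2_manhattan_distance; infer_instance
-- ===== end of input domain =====

-- B traverses value-major: for each tile value 1..8 it scans the grid for that value's
-- occurrences (goal cell by divmod(v-1,3)) instead of A's cell-major pass with a goal dict;
-- objective: alternative (same cost, transposed summation, no dict).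

-- ===== PORT A =====
-- the goal_positions dict literal of A
def pvGoalPositions : PySem.Dict Int (Int × Int) :=
  PySem.Dict.ofList [(1,(0,0)), (2,(0,1)), (3,(0,2)), (4,(1,0)), (5,(1,1)), (6,(1,2)), (7,(2,0)), (8,(2,1))]

def h2_manhattan_distance (state : List (List Int)) : Int :=
  (PySem.List.pyRange 0 3 1).foldl (fun distance r =>
    (PySem.List.pyRange 0 3 1).foldl (fun distance c =>
      let val := PySem.List.pyGetD (PySem.List.pyGetD state r []) c 0   -- state[r][c]; Pre_ keeps the indices in range
      if val ≠ 0 then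
        if pvGoalPositions.contains val then
          let t := pvGoalPositions.getD val (0, 0)
          distance + (|r - t.1| + |c - t.2|)
        else distance
      else distance) distance) 0

-- ===== PORT B =====
def h2_manhattan_distance_alt (state : List (List Int)) : Int :=
  (PySem.List.pyRange 1 9 1).foldl (fun total v =>
    let gr := PySem.Int.floordiv (v - 1) 3
    let gc := PySem.Int.mod (v - 1) 3
    total + ((PySem.List.pyRange 0 3 1).foldl (fun s r =>
      (PySem.List.pyRange 0 3 1).foldl (fun s c =>
        if PySem.List.pyGetD (PySem.List.pyGetD state r []) c 0 = v then
          s + (|r - gr| + |c - gc|)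
        else s) s) 0)) 0

-- ===== PRECONDITION & SPEC =====
-- Pre_ excludes grids smaller than 3x3, on which the Python A raises IndexError.
def Pre_h2_manhattan_distance (state : List (List Int)) : Prop :=
  3 ≤ state.length ∧ ∀ row ∈ state.take 3, 3 ≤ row.length
instance (state : List (List Int)) : Decidable (Pre_h2_manhattan_distance state) := by
  unfold Pre_h2_manhattan_distance; infer_instance

def pvWitness_h2_manhattan_distance : List (List Int) := [[1, 2, 3], [4, 5, 6], [7, 8, 0]]

def Spec_h2_manhattan_distance (state : List (List Int)) (out : Int) : Prop := out = h2_manhattan_distance_alt state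
instance (state : List (List Int)) (out : Int) : Decidable (Spec_h2_manhattan_distance state out) := by unfold Spec_h2_manhattan_distance; infer_instance

-- ===== CLAIM (what is proved, stated in full; the proofs are below) =====
def Claim_equal_h2_manhattan_distance : Prop := ∀ (state : List (List Int)), Dom_h2_manhattan_distance state → Pre_h2_manhattan_distance state → Spec_h2_manhattan_distance state (h2_manhattan_distance state)

-- ===== LEMMAS AND PROOFS =====

-- indexing a 3-element-prefixed list at the literal indices used by both loops
theorem pvIdx0 {A : Type} (x0 x1 x2 : A) (t : List A) (d : A) : PySem.List.pyGetD (x0::x1::x2::t) (0:Int) d = x0 := by simp [pysem]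
theorem pvIdx1 {A : Type} (x0 x1 x2 : A) (t : List A) (d : A) : PySem.List.pyGetD (x0::x1::x2::t) (1:Int) d = x1 := by simp [pysem]
theorem pvIdx2 {A : Type} (x0 x1 x2 : A) (t : List A) (d : A) : PySem.List.pyGetD (x0::x1::x2::t) (2:Int) d = x2 := by simp [pysem]

-- pull an accumulator out of a conditional step
theorem pvAddIte (p : Prop) [Decidable p] (t d : Int) :
    (if p then t + d else t) = t + (if p then d else 0) := by split <;> simp

-- A's per-cell contribution equals the sum of B's eight value tests at that cell
theorem pvCellSum (r c x : Int) :
    (if x ≠ 0 then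
       if pvGoalPositions.contains x then
         |r - (pvGoalPositions.getD x (0, 0)).1| + |c - (pvGoalPositions.getD x (0, 0)).2|
       else 0
     else 0)
    = (if x = 1 then |r - 0| + |c - 0| else 0) + (if x = 2 then |r - 0| + |c - 1| else 0)
    + (if x = 3 then |r - 0| + |c - 2| else 0) + (if x = 4 then |r - 1| + |c - 0| else 0)
    + (if x = 5 then |r - 1| + |c - 1| else 0) + (if x = 6 then |r - 1| + |c - 2| else 0)
    + (if x = 7 then |r - 2| + |c - 0| else 0) + (if x = 8 then |r - 2| + |c - 1| else 0) := by
  have hd : pvGoalPositions = PySem.Dict.mk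
      [(1,(0,0)), (2,(0,1)), (3,(0,2)), (4,(1,0)), (5,(1,1)), (6,(1,2)), (7,(2,0)), (8,(2,1))] := by decide
  by_cases h : 1 ≤ x ∧ x ≤ 8
  · obtain ⟨h1, h2⟩ := h
    interval_cases x <;>
      simp [hd, PySem.Dict.contains, PySem.Dict.getD, PySem.Dict.get?_mk_cons,
            show ((2:Int) = 1) = False from by norm_num,
            show ((3:Int) = 1) = False from by norm_num]
  · by_cases h0 : x = 0
    · simp [h0]
    · rw [if_pos h0]
      have hc : pvGoalPositions.contains x = false := by
        rw [hd]
        simp only [PySem.Dict.contains_mk, List.any_cons, List.any_nil, Bool.or_false]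
        simp only [Bool.or_eq_false_iff, beq_eq_false_iff_ne, ne_eq]
        omega
      have e1 : (x = 1) = False := by simp; omega
      have e2 : (x = 2) = False := by simp; omega
      have e3 : (x = 3) = False := by simp; omega
      have e4 : (x = 4) = False := by simp; omega
      have e5 : (x = 5) = False := by simp; omega
      have e6 : (x = 6) = False := by simp; omega
      have e7 : (x = 7) = False := by simp; omega
      have e8 : (x = 8) = False := by simp; omega
      simp [hc, e1, e2, e3, e4, e5, e6, e7, e8]

theorem h2_spec_aux (state : List (List Int))
    (hp : Pre_h2_manhattan_distance state) :
    h2_manhattan_distance state = h2_manhattan_distance_alt state := by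
  obtain ⟨hl, hr⟩ := hp
  match state, hl with
  | r0 :: r1 :: r2 :: rest, _ =>
    have h0 : 3 ≤ r0.length := hr r0 (by simp)
    have h1 : 3 ≤ r1.length := hr r1 (by simp)
    have h2 : 3 ≤ r2.length := hr r2 (by simp)
    match r0, h0 with
    | a0 :: a1 :: a2 :: _, _ =>
      match r1, h1 with
      | b0 :: b1 :: b2 :: _, _ =>
        match r2, h2 with
        | c0 :: c1 :: c2 :: _, _ =>
          simp only [h2_manhattan_distance, h2_manhattan_distance_alt,
            show PySem.List.pyRange 0 3 1 = [0, 1, 2] from by decide,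
            show PySem.List.pyRange 1 9 1 = [1, 2, 3, 4, 5, 6, 7, 8] from by decide,
            List.foldl,
            show PySem.Int.floordiv (1 - 1) 3 = 0 from by decide,
            show PySem.Int.floordiv (2 - 1) 3 = 0 from by decide,
            show PySem.Int.floordiv (3 - 1) 3 = 0 from by decide,
            show PySem.Int.floordiv (4 - 1) 3 = 1 from by decide,
            show PySem.Int.floordiv (5 - 1) 3 = 1 from by decide,
            show PySem.Int.floordiv (6 - 1) 3 = 1 from by decide,
            show PySem.Int.floordiv (7 - 1) 3 = 2 from by decide,
            show PySem.Int.floordiv (8 - 1) 3 = 2 from by decide,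
            show PySem.Int.mod (1 - 1) 3 = 0 from by decide,
            show PySem.Int.mod (2 - 1) 3 = 1 from by decide,
            show PySem.Int.mod (3 - 1) 3 = 2 from by decide,
            show PySem.Int.mod (4 - 1) 3 = 0 from by decide,
            show PySem.Int.mod (5 - 1) 3 = 1 from by decide,
            show PySem.Int.mod (6 - 1) 3 = 2 from by decide,
            show PySem.Int.mod (7 - 1) 3 = 0 from by decide,
            show PySem.Int.mod (8 - 1) 3 = 1 from by decide,
            pvIdx0, pvIdx1, pvIdx2, pvAddIte]
          simp only [pvCellSum]
          ring

-- ===== VERDICT (by name: the statement is the Claim_ definition above) =====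
theorem h2_manhattan_distance_spec : Claim_equal_h2_manhattan_distance := by
  intro state _ hp
  unfold Spec_h2_manhattan_distance
  exact (h2_spec_aux state hp)
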